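-- pv_equiv track=rewrite | github.com/Kyle44/Sudoku | CSP.py | findCurrPosInSquare
-- ===== SOURCE A (Python) =====
-- def findCurrPosInSquare(squareValues, posInSquare, squareNum):
-- 	currPos = squareValues[squareNum] # closest thing to current position
-- 	count = posInSquare # keep track of how many time you have to increase currPos\
--
-- 	while count > 0:
-- 		if count%3 == 0:
-- 			currPos+=7 # next row
-- 		else:
-- 			currPos+=1 # next value
-- 		count-=1
-- 	return currPos
-- ===== SOURCE B (Python) =====
-- def findCurrPosInSquare(squareValues, posInSquare, squareNum):
--     base = squareValues[squareNum]
--     if posInSquare <= 0: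
--         return base
--     return base + posInSquare + 6 * (posInSquare // 3)
-- ===== Notes on version B (the rewrite author's own statement) =====
-- stated objective: faster
-- what changed: Replaced the per-step counting loop (+7 on every third step, +1 otherwise) with the closed form base + posInSquare + 6*(posInSquare//3).
import Mathlib
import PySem

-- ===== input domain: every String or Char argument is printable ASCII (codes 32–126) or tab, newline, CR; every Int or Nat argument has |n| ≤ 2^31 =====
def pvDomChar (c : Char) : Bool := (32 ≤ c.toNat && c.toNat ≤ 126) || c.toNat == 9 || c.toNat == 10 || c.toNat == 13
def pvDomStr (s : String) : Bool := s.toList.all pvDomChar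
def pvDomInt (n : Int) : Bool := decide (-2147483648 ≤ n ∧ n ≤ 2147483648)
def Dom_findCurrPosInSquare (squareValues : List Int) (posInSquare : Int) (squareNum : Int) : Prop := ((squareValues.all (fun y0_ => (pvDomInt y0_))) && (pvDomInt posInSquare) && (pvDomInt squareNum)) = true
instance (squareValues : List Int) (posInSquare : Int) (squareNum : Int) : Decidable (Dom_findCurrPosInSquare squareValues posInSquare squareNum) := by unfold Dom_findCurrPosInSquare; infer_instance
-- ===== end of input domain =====

-- B replaces A's per-step counting loop with the closed form base + p + 6*(p//3); faster.
-- ===== PORT A =====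
-- the while loop of A: decrement count to 0, adding 7 on multiples of 3, else 1
def pvLoopA (currPos : Int) (count : Int) : Int :=
  if _h : count > 0 then
    pvLoopA (if PySem.Int.mod count 3 = 0 then currPos + 7 else currPos + 1) (count - 1)
  else currPos
termination_by count.toNat
decreasing_by omega

def findCurrPosInSquare (squareValues : List Int) (posInSquare : Int) (squareNum : Int) : Int :=
  match PySem.List.pyGet? squareValues squareNum with
  | some currPos => pvLoopA currPos posInSquare
  | none => 0   -- unreachable under Pre_ (Python raises IndexError)

-- ===== PORT B =====
def findCurrPosInSquare_alt (squareValues : List Int) (posInSquare : Int) (squareNum : Int) : Int :=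
  match PySem.List.pyGet? squareValues squareNum with
  | some base =>
      if posInSquare ≤ 0 then base
      else base + posInSquare + 6 * PySem.Int.floordiv posInSquare 3
  | none => 0   -- unreachable under Pre_ (Python raises IndexError)

-- ===== PRECONDITION & SPEC =====
-- Pre_ excludes exactly the inputs where Python raises IndexError (squareNum out of range)
def Pre_findCurrPosInSquare (squareValues : List Int) (posInSquare : Int) (squareNum : Int) : Prop :=
  PySem.Raise.InRange squareValues.length squareNum
instance (squareValues : List Int) (posInSquare : Int) (squareNum : Int) : Decidable (Pre_findCurrPosInSquare squareValues posInSquare squareNum) := by unfold Pre_findCurrPosInSquare; infer_instance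

def pvWitness_findCurrPosInSquare : List Int × Int × Int := ([10, 20, 30], 5, 1)

def Spec_findCurrPosInSquare (squareValues : List Int) (posInSquare : Int) (squareNum : Int) (out : Int) : Prop := out = findCurrPosInSquare_alt squareValues posInSquare squareNum
instance (squareValues : List Int) (posInSquare : Int) (squareNum : Int) (out : Int) : Decidable (Spec_findCurrPosInSquare squareValues posInSquare squareNum out) := by unfold Spec_findCurrPosInSquare; infer_instance

-- ===== CLAIM (what is proved, stated in full; the proofs are below) =====
def Claim_equal_findCurrPosInSquare : Prop := ∀ (squareValues : List Int) (posInSquare : Int) (squareNum : Int), Dom_findCurrPosInSquare squareValues posInSquare squareNum → Pre_findCurrPosInSquare squareValues posInSquare squareNum → Spec_findCurrPosInSquare squareValues posInSquare squareNum (findCurrPosInSquare squareValues posInSquare squareNum)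

-- ===== LEMMAS AND PROOFS =====
theorem pvLoopA_closed (n : Nat) : ∀ v : Int, pvLoopA v n = v + n + 6 * ((n : Int) / 3) := by
  induction n with
  | zero => intro v; unfold pvLoopA; simp
  | succ k ih =>
    intro v
    unfold pvLoopA
    have hpos : ((k + 1 : Nat) : Int) > 0 := by positivity
    rw [dif_pos hpos]
    have hm : PySem.Int.mod ((k + 1 : Nat) : Int) 3 = ((k + 1 : Nat) : Int) % 3 :=
      PySem.Int.mod_eq_emod_of_pos (by omega)
    have hstep : (((k + 1 : Nat) : Int) - 1) = (k : Int) := by push_cast; ring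
    rw [hm, hstep]
    by_cases h3 : ((k + 1 : Nat) : Int) % 3 = 0
    · rw [if_pos h3, ih]
      push_cast at h3 ⊢
      omega
    · rw [if_neg h3, ih]
      push_cast at h3 ⊢
      omega

theorem pvLoopA_eq (v p : Int) :
    pvLoopA v p = if p ≤ 0 then v else v + p + 6 * PySem.Int.floordiv p 3 := by
  by_cases hp : p ≤ 0
  · rw [if_pos hp]; unfold pvLoopA; rw [dif_neg (by omega)]
  · rw [if_neg hp]
    obtain ⟨n, rfl⟩ : ∃ n : Nat, p = (n : Int) := ⟨p.toNat, by omega⟩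
    rw [pvLoopA_closed, PySem.Int.floordiv_eq_ediv_of_pos (by omega)]

-- ===== VERDICT (by name: the statement is the Claim_ definition above) =====
theorem findCurrPosInSquare_spec : Claim_equal_findCurrPosInSquare := by
  intro squareValues posInSquare squareNum _ _
  unfold Spec_findCurrPosInSquare findCurrPosInSquare findCurrPosInSquare_alt
  cases PySem.List.pyGet? squareValues squareNum with
  | none => rfl
  | some v => exact pvLoopA_eq v posInSquare
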